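-- pv_equiv track=rewrite | github.com/joanitasantiago/Data-Structures-and-Algorithms | LexicographicallySmallestString.py | terrible_lex_smallest_string
-- ===== SOURCE A (Python) =====
-- def terrible_lex_smallest_string(S):
--
--     to_be_removed = -1
--     newString = ""
--
--     for i in range(len(S) - 1):
--         if S[i] > S[i+1]:
--             to_be_removed = i
--             break
--
--     if to_be_removed >= 0:
--         for i in range(len(S)):
--             if i != to_be_removed:
--                 newString = newString + S[i]
--     else:
--         for i in range(len(S) - 1):
--             newString = newString + S[i]
--
--     return newString
-- ===== SOURCE B (Python) =====
-- def terrible_lex_smallest_string(S):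
--     if not S:
--         return ""
--     return min(S[:i] + S[i+1:] for i in range(len(S)))
-- ===== Notes on version B (the rewrite author's own statement) =====
-- stated objective: alternative
-- what changed: Replaces the greedy first-descent scan plus character-by-character rebuild loops with a brute-force minimum over all single-character deletions (min of S[:i]+S[i+1:]); equivalent because deleting at the first descent (or the last char) yields the lexicographic minimum.
import Mathlib
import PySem

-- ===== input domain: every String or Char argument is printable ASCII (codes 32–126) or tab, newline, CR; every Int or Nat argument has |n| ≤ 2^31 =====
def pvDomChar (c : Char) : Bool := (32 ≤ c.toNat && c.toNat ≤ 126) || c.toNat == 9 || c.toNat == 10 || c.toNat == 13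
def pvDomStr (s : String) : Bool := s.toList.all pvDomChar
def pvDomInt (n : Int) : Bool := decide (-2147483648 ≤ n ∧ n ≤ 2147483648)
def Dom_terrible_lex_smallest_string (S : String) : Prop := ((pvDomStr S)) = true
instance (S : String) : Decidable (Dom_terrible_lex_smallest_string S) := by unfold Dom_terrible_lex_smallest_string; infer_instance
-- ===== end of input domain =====

-- B replaces A's greedy first-descent scan by the minimum over all single-character deletions (alternative algorithm, not faster).

-- ===== PORT A =====
-- Literal transliteration of A: a first-descent index scan with break, then a
-- character-by-character rebuild loop.  Indexing uses PySem.List.pyGetD with a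
-- dummy default ' ': every index the loops produce is in range, so the default
-- is never used (Python's S[i] cannot raise here).
def terrible_lex_smallest_string (S : String) : String :=
  let s := S.toList
  let n : Int := (s.length : Int)
  let to_be_removed : Int :=
    ((PySem.List.pyRange 0 (n - 1)).foldl
      (fun st i =>
        match st with
        | some j => some j          -- loop already broke: state frozen
        | none =>
          if PySem.List.pyGetD s (i + 1) ' ' < PySem.List.pyGetD s i ' ' then some i
          else none)
      none).getD (-1)
  let newString : List Char :=
    if to_be_removed ≥ 0 then
      (PySem.List.pyRange 0 n).foldl
        (fun acc i => if i ≠ to_be_removed then acc ++ [PySem.List.pyGetD s i ' '] else acc) []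
    else
      (PySem.List.pyRange 0 (n - 1)).foldl
        (fun acc i => acc ++ [PySem.List.pyGetD s i ' ']) []
  String.ofList newString

-- ===== PORT B =====
-- Literal transliteration of B: empty-string guard, then
-- min(S[:i] + S[i+1:] for i in range(len(S))).
def terrible_lex_smallest_string_alt (S : String) : String :=
  let s := S.toList
  if s = [] then ""
  else
    let cands := (PySem.List.pyRange 0 (s.length : Int)).map
      (fun i => PySem.List.slice s none (some i) ++ PySem.List.slice s (some (i + 1)) none)
    String.ofList ((PySem.List.min? cands id).getD [])

-- ===== PRECONDITION & SPEC =====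
def Spec_terrible_lex_smallest_string (S : String) (out : String) : Prop := out = terrible_lex_smallest_string_alt S
instance (S : String) (out : String) : Decidable (Spec_terrible_lex_smallest_string S out) := by unfold Spec_terrible_lex_smallest_string; infer_instance

-- ===== CLAIM (what is proved, stated in full; the proofs are below) =====
def Claim_equal_terrible_lex_smallest_string : Prop := ∀ (S : String), Dom_terrible_lex_smallest_string S → Spec_terrible_lex_smallest_string S (terrible_lex_smallest_string S)

-- ===== LEMMAS AND PROOFS =====

-- The greedy result: drop the char at the first descent, or the last char if none.
def pvGreedy : List Char → List Char
  | [] => []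
  | [_] => []
  | a :: b :: t => if b < a then b :: t else a :: pvGreedy (b :: t)

-- First-descent index of A's first loop, as a Nat-valued function.
def pvF (l : List Char) : Option Nat :=
  (List.range (l.length - 1)).find? (fun k => decide (l.getD (k + 1) ' ' < l.getD k ' '))

-- A's break-loop: once the state is `some`, it is frozen.
theorem pv_foldl_break_some (p : Int → Prop) [DecidablePred p] (xs : List Int) (k : Int) :
    xs.foldl (fun st i =>
      match st with
      | some j => some j
      | none => if p i then some i else none) (some k) = some k := by
  induction xs with
  | nil => rfl
  | cons x xs ih => simpa using ih

theorem pv_foldl_break_none (p : Int → Prop) [DecidablePred p] (xs : List Int) :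
    xs.foldl (fun st i =>
      match st with
      | some j => some j
      | none => if p i then some i else none) none
      = xs.find? (fun i => decide (p i)) := by
  induction xs with
  | nil => rfl
  | cons x xs ih =>
    by_cases h : p x
    · simp [List.foldl_cons, List.find?, h, pv_foldl_break_some]
    · simpa [List.foldl_cons, List.find?, h] using ih

theorem pv_map_getD_range_take (l : List Char) :
    ∀ m, m ≤ l.length → (List.range m).map (fun j => l.getD j ' ') = l.take m := by
  induction l with
  | nil => intro m hm; simp at hm; simp [hm]
  | cons a t ih =>
    intro m hm
    cases m with
    | zero => simp
    | succ m' =>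
      rw [List.range_succ_eq_map]
      simp only [List.map_cons, List.map_map]
      have : (List.range m').map ((fun j => (a :: t).getD j ' ') ∘ Nat.succ)
           = (List.range m').map (fun j => t.getD j ' ') := by
        apply List.map_congr_left; intro j _; rfl
      rw [this, ih m' (by simpa using hm)]
      simp [List.getD]

theorem pv_map_getD_filter_ne (l : List Char) :
    ∀ k, k < l.length →
      ((List.range l.length).filter (fun j => j ≠ k)).map (fun j => l.getD j ' ')
        = l.eraseIdx k := by
  induction l with
  | nil => intro k hk; simp at hk
  | cons a t ih =>
    intro k hk
    rw [show (a :: t).length = t.length + 1 from rfl, List.range_succ_eq_map]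
    cases k with
    | zero =>
      simp only [List.filter_cons, decide_eq_true_eq]
      rw [if_neg (by simp)]
      rw [List.filter_map]
      have hall : (List.range t.length).filter ((fun j => decide (j ≠ 0)) ∘ Nat.succ)
          = List.range t.length := by
        apply List.filter_eq_self.mpr; intro j _; simp
      rw [hall, List.map_map]
      have : (List.range t.length).map ((fun j => (a :: t).getD j ' ') ∘ Nat.succ)
           = (List.range t.length).map (fun j => t.getD j ' ') := by
        apply List.map_congr_left; intro j _; rfl
      rw [this, pv_map_getD_range_take t t.length le_rfl, List.take_length, List.eraseIdx_cons_zero]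
    | succ k' =>
      simp only [List.filter_cons, decide_eq_true_eq]
      rw [if_pos (by simp)]
      rw [List.filter_map, List.map_cons, List.map_map]
      have hfil : (List.range t.length).filter ((fun j => decide (j ≠ k' + 1)) ∘ Nat.succ)
          = (List.range t.length).filter (fun j => j ≠ k') := by
        apply List.filter_congr; intro j _; simp
      rw [hfil]
      have : ((List.range t.length).filter (fun j => j ≠ k')).map
               ((fun j => (a :: t).getD j ' ') ∘ Nat.succ)
           = ((List.range t.length).filter (fun j => j ≠ k')).map (fun j => t.getD j ' ') := by
        apply List.map_congr_left; intro j _; rfl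
      rw [this, ih k' (by simp at hk; omega), List.eraseIdx_cons_succ]
      rfl

theorem pvF_lt {l : List Char} {k : Nat} (h : pvF l = some k) : k < l.length := by
  have hk := List.mem_of_find?_eq_some h
  have := List.mem_range.mp hk
  omega

-- A's first loop computes pvF.
theorem pv_loop1_eq (l : List Char) :
    (PySem.List.pyRange 0 ((l.length : Int) - 1)).find?
        (fun i => decide (PySem.List.pyGetD l (i + 1) ' ' < PySem.List.pyGetD l i ' '))
      = (pvF l).map (Nat.cast : Nat → Int) := by
  cases l with
  | nil => rfl
  | cons a t =>
    have hlen : ((a :: t).length : Int) - 1 = (t.length : Nat) := by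
      simp
    rw [hlen, PySem.List.pyRange_zero_natCast, List.find?_map]
    have : ∀ k : Nat,
        ((fun i => decide (PySem.List.pyGetD (a :: t) (i + 1) ' ' < PySem.List.pyGetD (a :: t) i ' ')) ∘ (fun k : Nat => (k : Int))) k
        = (fun k => decide ((a :: t).getD (k + 1) ' ' < (a :: t).getD k ' ')) k := by
      intro k
      simp only [Function.comp]
      rw [show ((k : Int) + 1) = ((k + 1 : Nat) : Int) by push_cast; ring]
      rw [PySem.List.pyGetD_natCast, PySem.List.pyGetD_natCast]
    rw [funext this]
    simp [pvF, Option.map_eq_bind]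

-- A as a whole: erase at the first descent, else drop the last char.
theorem pv_min?_foldl_some {α κ : Type} [LT κ] [DecidableLT κ] (key : α → κ) :
    ∀ (xs : List α) (m : α), ∃ m',
      xs.foldl (fun acc x =>
        match acc with
        | none => some x
        | some m => if key x < key m then some x else some m) (some m) = some m' := by
  intro xs
  induction xs with
  | nil => intro m; exact ⟨m, rfl⟩
  | cons y ys ih =>
    intro m
    by_cases h : key y < key m
    · simpa [h] using ih y
    · simpa [h] using ih m

theorem pv_min?_some {α κ : Type} [LT κ] [DecidableLT κ] (key : α → κ) (x : α) (xs : List α) :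
    ∃ m', PySem.List.min? (x :: xs) key = some m' := by
  unfold PySem.List.min?
  rw [List.foldl_cons]
  exact pv_min?_foldl_some key xs x

theorem pv_portA_eq (S : String) :
    terrible_lex_smallest_string S
      = String.ofList (match pvF S.toList with
                   | some k => S.toList.eraseIdx k
                   | none => S.toList.dropLast) := by
  simp only [terrible_lex_smallest_string]
  rw [pv_foldl_break_none
        (fun i => PySem.List.pyGetD S.toList (i + 1) ' ' < PySem.List.pyGetD S.toList i ' '),
      pv_loop1_eq S.toList]
  cases hF : pvF S.toList with
  | some k =>
    have hk := pvF_lt hF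
    rw [Option.map_some, Option.getD_some,
        if_pos (show ((k : Nat) : Int) ≥ 0 from Int.natCast_nonneg k)]
    have hb : (fun (acc : List Char) (i : Int) =>
                 if i ≠ (k : Int) then acc ++ [PySem.List.pyGetD S.toList i ' '] else acc)
            = (fun acc i =>
                 if (fun i => decide (i ≠ (k : Int))) i = true
                 then acc ++ [(fun i => PySem.List.pyGetD S.toList i ' ') i] else acc) := by
      funext acc i; simp
    rw [hb, PySem.List.foldl_append_if, List.nil_append, PySem.List.pyRange_zero_natCast,
        List.filter_map, List.map_map]
    have hfil : (List.range S.toList.length).filter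
          ((fun i => decide (i ≠ (k : Int))) ∘ fun j : Nat => (j : Int))
        = (List.range S.toList.length).filter (fun j => decide (j ≠ k)) := by
      apply List.filter_congr; intro j _; simp [Function.comp]
    rw [hfil]
    have hmap : ((List.range S.toList.length).filter (fun j => decide (j ≠ k))).map
          ((fun i => PySem.List.pyGetD S.toList i ' ') ∘ fun j : Nat => (j : Int))
        = ((List.range S.toList.length).filter (fun j => decide (j ≠ k))).map
            (fun j => S.toList.getD j ' ') := by
      apply List.map_congr_left; intro j _
      simp [Function.comp, PySem.List.pyGetD_natCast]
    rw [hmap, pv_map_getD_filter_ne S.toList k hk]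
  | none =>
    rw [Option.map_none, Option.getD_none, if_neg (by norm_num)]
    rw [PySem.List.foldl_append_singleton_eq_map, List.nil_append]
    by_cases hnil : S.toList = []
    · rw [hnil]; rfl
    · have hpos : 1 ≤ S.toList.length := List.length_pos_iff.mpr hnil
      have hlen : ((S.toList.length : Int) - 1) = ((S.toList.length - 1 : Nat) : Int) := by
        omega
      rw [hlen, PySem.List.pyRange_zero_natCast, List.map_map]
      have hmap : (List.range (S.toList.length - 1)).map
            ((fun i => PySem.List.pyGetD S.toList i ' ') ∘ fun j : Nat => (j : Int))
          = (List.range (S.toList.length - 1)).map (fun j => S.toList.getD j ' ') := by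
        apply List.map_congr_left; intro j _
        simp [Function.comp, PySem.List.pyGetD_natCast]
      rw [hmap, pv_map_getD_range_take S.toList (S.toList.length - 1) (by omega),
          ← List.dropLast_eq_take]

theorem pv_cons_le_cons (c : Char) {s t : List Char} (h : s ≤ t) : c :: s ≤ c :: t := by
  rcases lt_or_eq_of_le h with hlt | heq
  · exact le_of_lt (List.cons_lt_cons_iff.mpr (Or.inr ⟨rfl, hlt⟩))
  · rw [heq]

-- Greedy is minimal among all single-deletion candidates.
theorem pv_greedy_min (l : List Char) : ∀ k, k < l.length → pvGreedy l ≤ l.eraseIdx k := by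
  induction l with
  | nil => intro k hk; simp at hk
  | cons a t ih =>
    cases t with
    | nil =>
      intro k hk
      have : k = 0 := by simpa using hk
      subst this
      simp [pvGreedy]
    | cons b t' =>
      intro k hk
      by_cases h : b < a
      · simp only [pvGreedy, if_pos h]
        cases k with
        | zero => simp
        | succ k' =>
          rw [List.eraseIdx_cons_succ]
          exact le_of_lt (List.cons_lt_cons_iff.mpr (Or.inl h))
      · simp only [pvGreedy, if_neg h]
        have hab : a ≤ b := le_of_not_gt h
        cases k with
        | zero =>
          rw [List.eraseIdx_cons_zero]
          rcases lt_or_eq_of_le hab with hlt | heq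
          · exact le_of_lt (List.cons_lt_cons_iff.mpr (Or.inl hlt))
          · rw [heq]
            exact pv_cons_le_cons b (by simpa using ih 0 (by simp))
        | succ k' =>
          rw [List.eraseIdx_cons_succ]
          exact pv_cons_le_cons a (ih k' (by simp only [List.length_cons] at hk ⊢; omega))

theorem pv_greedy_mem (l : List Char) (h : l ≠ []) :
    ∃ k, k < l.length ∧ pvGreedy l = l.eraseIdx k := by
  induction l with
  | nil => exact absurd rfl h
  | cons a t ih =>
    cases t with
    | nil => exact ⟨0, by simp, rfl⟩
    | cons b t' =>
      by_cases hba : b < a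
      · exact ⟨0, by simp, by simp [pvGreedy, hba]⟩
      · obtain ⟨k, hk, he⟩ := ih (by simp)
        exact ⟨k + 1, by simp at hk ⊢; omega,
          by simp [pvGreedy, hba, List.eraseIdx_cons_succ, he]⟩

-- pvF's erase coincides with greedy.
theorem pv_pvF_greedy (l : List Char) :
    (match pvF l with
     | some k => l.eraseIdx k
     | none => l.dropLast) = pvGreedy l := by
  induction l with
  | nil => rfl
  | cons a t ih =>
    cases t with
    | nil => rfl
    | cons b t' =>
      by_cases h : b < a
      · have hF : pvF (a :: b :: t') = some 0 := by
          simp [pvF, List.range_succ_eq_map, List.getD, h]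
        simp [hF, pvGreedy, h]
      · have hstep : pvF (a :: b :: t') = (pvF (b :: t')).map Nat.succ := by
          show (List.range ((a :: b :: t').length - 1)).find? _ = _
          have hl : (a :: b :: t').length - 1 = t'.length + 1 := rfl
          rw [hl, List.range_succ_eq_map, List.find?_cons]
          have h0 : decide ((a :: b :: t').getD (0 + 1) ' ' < (a :: b :: t').getD 0 ' ') = false := by
            simp [List.getD, h]
          simp only [h0]
          rw [List.find?_map]
          have hp : ((fun k => decide ((a :: b :: t').getD (k + 1) ' ' < (a :: b :: t').getD k ' ')) ∘ Nat.succ)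
              = (fun k => decide ((b :: t').getD (k + 1) ' ' < (b :: t').getD k ' ')) := by
            funext k; rfl
          rw [hp]
          rfl
        rw [hstep]
        cases hF : pvF (b :: t') with
        | none =>
          rw [hF] at ih
          simp only [Option.map_none]
          simp only [pvGreedy, if_neg h]
          rw [List.dropLast_cons₂, ← ih]
        | some k =>
          rw [hF] at ih
          simp only [Option.map_some]
          simp only [pvGreedy, if_neg h]
          rw [show Nat.succ k = k + 1 from rfl, List.eraseIdx_cons_succ, ← ih]

theorem pv_portB_eq (S : String) :
    terrible_lex_smallest_string_alt S = String.ofList (pvGreedy S.toList) := by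
  simp only [terrible_lex_smallest_string_alt]
  by_cases hnil : S.toList = []
  · rw [if_pos hnil, hnil]; rfl
  · rw [if_neg hnil]
    have hc : (PySem.List.pyRange 0 (S.toList.length : Int)).map
        (fun i => PySem.List.slice S.toList none (some i)
                  ++ PySem.List.slice S.toList (some (i + 1)) none)
        = (List.range S.toList.length).map (fun k => S.toList.eraseIdx k) := by
      rw [PySem.List.pyRange_zero_natCast, List.map_map]
      apply List.map_congr_left
      intro j _
      simp only [Function.comp]
      rw [PySem.List.slice_to S.toList (Int.natCast_nonneg j),
          PySem.List.slice_from S.toList (by positivity),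
          List.eraseIdx_eq_take_drop_succ]
      have h1 : ((j : Int)).toNat = j := Int.toNat_natCast j
      have h2 : ((j : Int) + 1).toNat = j + 1 := by omega
      rw [h1, h2]
    rw [hc]
    obtain ⟨k0, hk0, hg⟩ := pv_greedy_mem S.toList hnil
    have hgmem : pvGreedy S.toList ∈ (List.range S.toList.length).map (fun k => S.toList.eraseIdx k) :=
      List.mem_map.mpr ⟨k0, List.mem_range.mpr hk0, hg.symm⟩
    cases hmin : PySem.List.min? ((List.range S.toList.length).map fun k => S.toList.eraseIdx k) id with
    | none =>
      exfalso
      have hne : (List.range S.toList.length).map (fun k => S.toList.eraseIdx k) ≠ [] := by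
        intro hcon
        exact absurd (hcon ▸ hgmem) (List.not_mem_nil)
      cases hxs : (List.range S.toList.length).map (fun k => S.toList.eraseIdx k) with
      | nil => exact hne hxs
      | cons x xs =>
        rw [hxs] at hmin
        obtain ⟨m', hm'⟩ := pv_min?_some (id : List Char → List Char) x xs
        rw [hmin] at hm'
        simp at hm'
    | some m =>
      have hmin' : @PySem.List.min? (List Char) (List Char) LinearOrder.toPartialOrder.toLT
          LinearOrder.toDecidableLT ((List.range S.toList.length).map fun k => S.toList.eraseIdx k) id
          = some m := by
        rw [show (LinearOrder.toDecidableLT : DecidableLT (List Char))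
              = (fun a b => a.decidableLT b) from Subsingleton.elim _ _]
        exact hmin
      have h1 : m ≤ pvGreedy S.toList := PySem.List.min?_isMin hmin' _ hgmem
      have h2 : pvGreedy S.toList ≤ m := by
        obtain ⟨k, hk, he⟩ := List.mem_map.mp (PySem.List.min?_mem hmin)
        rw [← he]
        exact pv_greedy_min S.toList k (List.mem_range.mp hk)
      rw [Option.getD_some, le_antisymm h1 h2]

-- ===== VERDICT (by name: the statement is the Claim_ definition above) =====
theorem terrible_lex_smallest_string_spec : Claim_equal_terrible_lex_smallest_string := by
  intro S _
  unfold Spec_terrible_lex_smallest_string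
  rw [pv_portA_eq, pv_portB_eq, pv_pvF_greedy]
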